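-- pv_equiv track=rewrite | github.com/TeodorKolev/LotoHacked | lambdas/analytics.py | predict_next_pattern
-- ===== SOURCE A (Python) =====
-- from typing import List, Dict, Union
--
-- def categorize_number(number: int, max_number: int = 49) -> str:
--     """Categorize number into color ranges"""
--     if max_number == 70:  # KENO range
--         if 1 <= number <= 10:
--             return 'green'
--         elif 11 <= number <= 20:
--             return 'yellow'
--         elif 21 <= number <= 30:
--             return 'red'
--         elif 31 <= number <= 40:
--             return 'purple'
--         elif 41 <= number <= 50:
--             return 'blue'
--         elif 51 <= number <= 60:
--             return 'orange'
--         elif 61 <= number <= 70: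
--             return 'pink'
--         else:
--             return 'out_of_range'
--     else:  # Standard lottery range (1-49)
--         if 1 <= number <= 10:
--             return 'green'
--         elif 11 <= number <= 20:
--             return 'yellow'
--         elif 21 <= number <= 30:
--             return 'red'
--         elif 31 <= number <= 40:
--             return 'purple'
--         elif 41 <= number <= 49:
--             return 'blue'
--         else:
--             return 'out_of_range'
--
-- def predict_next_pattern(data: List[Dict], max_number: int = 49) -> str:
--     """Simple pattern prediction based on most recent pattern"""
--     if not data:
--         if max_number == 70:  # KENO - 20 numbers
--             return "-".join(["green"] * 3 + ["yellow"] * 3 + ["red"] * 3 + ["purple"] * 3 + ["blue"] * 3 + ["orange"] * 3 + ["pink"] * 2)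
--         else:  # Standard lottery - 5 numbers
--             return "green-yellow-red-purple-blue"
--
--     # Get the most recent pattern
--     recent_row = data[-1]
--     if max_number == 70:  # KENO - 20 numbers
--         numbers = sorted([recent_row[f'boule_{i}'] for i in range(1, 21)])
--     else:  # Standard lottery - 5 numbers
--         numbers = sorted([recent_row['boule_1'], recent_row['boule_2'], recent_row['boule_3'], recent_row['boule_4'], recent_row['boule_5']])
--     colors = [categorize_number(n, max_number) for n in numbers]
--     return '-'.join(colors)
-- ===== SOURCE B (Python) =====
-- LABELS = ['out_of_range', 'green', 'yellow', 'red', 'purple', 'blue', 'orange', 'pink', 'out_of_range']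
--
-- def predict_next_pattern(data, max_number=49):
--     keno = max_number == 70
--     bound = 70 if keno else 49
--     if not data:
--         if keno:
--             return '-'.join(l for l, c in zip(LABELS[1:8], (3, 3, 3, 3, 3, 3, 2)) for _ in range(c))
--         return '-'.join(LABELS[1:6])
--     row = data[-1]
--     count = 20 if keno else 5
--     # one counting pass into 9 buckets (below-range, seven decades, above-range); no sort
--     buckets = [0] * 9
--     for i in range(1, count + 1):
--         n = row['boule_%d' % i]
--         if n < 1:
--             buckets[0] += 1
--         elif n > bound:
--             buckets[8] += 1
--         else:
--             buckets[1 + (n - 1) // 10] += 1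
--     return '-'.join(l for l, c in zip(LABELS, buckets) for _ in range(c))
-- ===== Notes on version B (the rewrite author's own statement) =====
-- stated objective: alternative
-- what changed: A sorts the drawn numbers and maps each through an if/elif range cascade; B never sorts: one counting pass buckets each number into a 9-slot histogram (below-range, seven decades, above-range) and the result is emitted by expanding the histogram against a fixed label table, which yields the same string because the color of a number is monotone in the number.
import Mathlib
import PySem

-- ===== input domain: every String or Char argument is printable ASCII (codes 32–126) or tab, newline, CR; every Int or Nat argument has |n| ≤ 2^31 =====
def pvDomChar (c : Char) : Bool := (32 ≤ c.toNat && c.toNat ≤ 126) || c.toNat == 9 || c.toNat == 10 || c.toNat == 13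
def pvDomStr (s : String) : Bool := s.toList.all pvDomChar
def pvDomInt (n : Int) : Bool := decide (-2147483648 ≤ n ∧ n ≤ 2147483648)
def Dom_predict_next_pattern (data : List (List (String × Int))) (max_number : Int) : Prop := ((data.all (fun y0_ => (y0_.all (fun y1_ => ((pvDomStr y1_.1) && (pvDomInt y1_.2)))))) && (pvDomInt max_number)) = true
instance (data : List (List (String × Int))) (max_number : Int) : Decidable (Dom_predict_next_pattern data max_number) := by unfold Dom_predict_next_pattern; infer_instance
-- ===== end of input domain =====

-- B replaces A's sort-then-categorize pipeline by one counting pass into 9 buckets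
-- (below-range, seven decades, above-range) expanded into labels — no sort, no per-number branch cascade.

-- sequencing of dict lookups: `none` = the Python KeyError (excluded by Pre_)
def seqOpt : List (Option Int) → Option (List Int)
  | [] => some []
  | none :: _ => none
  | some x :: rest => (seqOpt rest).map (x :: ·)

-- ===== PORT A =====
def categorize_number (number : Int) (max_number : Int) : String :=
  if max_number = 70 then
    if 1 ≤ number ∧ number ≤ 10 then "green"
    else if 11 ≤ number ∧ number ≤ 20 then "yellow"
    else if 21 ≤ number ∧ number ≤ 30 then "red"
    else if 31 ≤ number ∧ number ≤ 40 then "purple"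
    else if 41 ≤ number ∧ number ≤ 50 then "blue"
    else if 51 ≤ number ∧ number ≤ 60 then "orange"
    else if 61 ≤ number ∧ number ≤ 70 then "pink"
    else "out_of_range"
  else
    if 1 ≤ number ∧ number ≤ 10 then "green"
    else if 11 ≤ number ∧ number ≤ 20 then "yellow"
    else if 21 ≤ number ∧ number ≤ 30 then "red"
    else if 31 ≤ number ∧ number ≤ 40 then "purple"
    else if 41 ≤ number ∧ number ≤ 49 then "blue"
    else "out_of_range"

def predict_next_pattern (data : List (List (String × Int))) (max_number : Int) : String :=
  if data = [] then
    if max_number = 70 then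
      PySem.Str.join "-" (["green"] ++ ["green"] ++ ["green"] ++ ["yellow"] ++ ["yellow"] ++ ["yellow"]
        ++ ["red"] ++ ["red"] ++ ["red"] ++ ["purple"] ++ ["purple"] ++ ["purple"]
        ++ ["blue"] ++ ["blue"] ++ ["blue"] ++ ["orange"] ++ ["orange"] ++ ["orange"]
        ++ ["pink"] ++ ["pink"])
    else "green-yellow-red-purple-blue"
  else
    match PySem.List.pyGet? data (-1) with
    | none => ""   -- unreachable: data ≠ []
    | some recent_row =>
      let numbersOpt : List (Option Int) :=
        if max_number = 70 then
          (PySem.List.pyRange 1 21 1).map (fun i => List.lookup ("boule_" ++ PySem.Int.toStr i) recent_row)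
        else
          [List.lookup "boule_1" recent_row, List.lookup "boule_2" recent_row,
           List.lookup "boule_3" recent_row, List.lookup "boule_4" recent_row,
           List.lookup "boule_5" recent_row]
      match seqOpt numbersOpt with
      | none => ""   -- KeyError in Python, excluded by Pre_
      | some nums =>
        let numbers := PySem.List.sorted nums (fun x => x) false
        PySem.Str.join "-" (numbers.map (fun n => categorize_number n max_number))

-- ===== PORT B =====
def pyLABELS : List String :=
  ["out_of_range", "green", "yellow", "red", "purple", "blue", "orange", "pink", "out_of_range"]

-- one loop-body step of Source B: bucket the number n into the 9-slot histogram
-- (the else-branch index 1 + (n-1)//10 is nonnegative there since 1 ≤ n, so .toNat is exact)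
def bucketStep (bound : Int) (bs : List Int) (n : Int) : List Int :=
  if n < 1 then bs.set 0 (bs.getD 0 0 + 1)
  else if bound < n then bs.set 8 (bs.getD 8 0 + 1)
  else bs.set (1 + PySem.Int.floordiv (n - 1) 10).toNat
        (bs.getD (1 + PySem.Int.floordiv (n - 1) 10).toNat 0 + 1)

-- the counting loop of Source B over the required keys; none = KeyError (excluded by Pre_)
def bucketsOf (row : List (String × Int)) (count : Int) (bound : Int) : Option (List Int) :=
  (PySem.List.pyRange 1 (count + 1) 1).foldl
    (fun acc i =>
      acc.bind (fun bs =>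
        match List.lookup ("boule_" ++ PySem.Int.toStr i) row with
        | none => none
        | some n => some (bucketStep bound bs n)))
    (some (List.replicate 9 0))

def predict_next_pattern_alt (data : List (List (String × Int))) (max_number : Int) : String :=
  let keno := max_number = 70
  let bound : Int := if keno then 70 else 49
  if data = [] then
    if keno then
      PySem.Str.join "-"
        (((PySem.List.slice pyLABELS (some 1) (some 8)).zip
            ([3, 3, 3, 3, 3, 3, 2] : List Int)).flatMap
          (fun p => List.replicate p.2.toNat p.1))
    else
      PySem.Str.join "-" (PySem.List.slice pyLABELS (some 1) (some 6))
  else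
    match PySem.List.pyGet? data (-1) with
    | none => ""   -- unreachable: data ≠ []
    | some row =>
      let count : Int := if keno then 20 else 5
      match bucketsOf row count bound with
      | none => ""   -- KeyError in Python, excluded by Pre_
      | some buckets =>
        PySem.Str.join "-"
          ((pyLABELS.zip buckets).flatMap (fun p => List.replicate p.2.toNat p.1))

-- ===== PRECONDITION & SPEC =====
def requiredKeys (max_number : Int) : List String :=
  (PySem.List.pyRange 1 (if max_number = 70 then 21 else 6) 1).map
    (fun i => "boule_" ++ PySem.Int.toStr i)

-- Pre_ excludes exactly the inputs where the Python raises KeyError: a nonempty data whose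
-- last row is missing one of the required 'boule_i' keys.
def Pre_predict_next_pattern (data : List (List (String × Int))) (max_number : Int) : Prop :=
  (data.getLast?.all (fun row => (requiredKeys max_number).all
    (fun k => (List.lookup k row).isSome))) = true
instance (data : List (List (String × Int))) (max_number : Int) : Decidable (Pre_predict_next_pattern data max_number) := by unfold Pre_predict_next_pattern; infer_instance

def pvWitness_predict_next_pattern : (List (List (String × Int))) × Int :=
  ([[("boule_1", 3), ("boule_2", 17), ("boule_3", 25), ("boule_4", 42), ("boule_5", 49)]], 49)

def Spec_predict_next_pattern (data : List (List (String × Int))) (max_number : Int) (out : String) : Prop := out = predict_next_pattern_alt data max_number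
instance (data : List (List (String × Int))) (max_number : Int) (out : String) : Decidable (Spec_predict_next_pattern data max_number out) := by unfold Spec_predict_next_pattern; infer_instance

-- ===== CLAIM =====
def Claim_equal_predict_next_pattern : Prop := ∀ (data : List (List (String × Int))) (max_number : Int), Dom_predict_next_pattern data max_number → Pre_predict_next_pattern data max_number → Spec_predict_next_pattern data max_number (predict_next_pattern data max_number)

-- ===== LEMMAS AND PROOFS =====

-- the bucket index of a number (0 = below range, 1..7 decades, 8 = above range)
def pyIdx (bound n : Int) : Nat :=
  if n < 1 then 0 else if bound < n then 8 else (1 + PySem.Int.floordiv (n - 1) 10).toNat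

lemma bucketStep_eq (bound : Int) (bs : List Int) (n : Int) :
    bucketStep bound bs n = bs.set (pyIdx bound n) (bs.getD (pyIdx bound n) 0 + 1) := by
  unfold bucketStep pyIdx; split_ifs <;> rfl

lemma pyIdx_lt (bound n : Int) (hb : bound ≤ 70) : pyIdx bound n < 9 := by
  unfold pyIdx
  split_ifs with h1 h2
  · omega
  · omega
  · rw [PySem.Int.floordiv_eq_ediv_of_pos (by omega)]
    omega

lemma pyIdx_mono (bound : Int) (hb : bound ≤ 70) {a b : Int} (h : a ≤ b) : pyIdx bound a ≤ pyIdx bound b := by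
  unfold pyIdx
  rw [show PySem.Int.floordiv (a - 1) 10 = (a - 1) / 10 from
        PySem.Int.floordiv_eq_ediv_of_pos (by omega),
      show PySem.Int.floordiv (b - 1) 10 = (b - 1) / 10 from
        PySem.Int.floordiv_eq_ediv_of_pos (by omega)]
  split_ifs <;> omega

lemma categorize_eq_label (n mx : Int) :
    categorize_number n mx = pyLABELS.getD (pyIdx (if mx = 70 then 70 else 49) n) "" := by
  by_cases h : mx = 70 <;> simp only [categorize_number, h, if_true, if_false]
  · by_cases hin : 1 ≤ n ∧ n ≤ 70
    · obtain ⟨h1, h2⟩ := hin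
      interval_cases n <;> decide
    · have : pyIdx 70 n = 0 ∨ pyIdx 70 n = 8 := by unfold pyIdx; split_ifs <;> omega
      rcases this with h0 | h0 <;> rw [h0] <;> split_ifs <;> first | rfl | omega
  · by_cases hin : 1 ≤ n ∧ n ≤ 49
    · obtain ⟨h1, h2⟩ := hin
      interval_cases n <;> decide
    · have : pyIdx 49 n = 0 ∨ pyIdx 49 n = 8 := by unfold pyIdx; split_ifs <;> omega
      rcases this with h0 | h0 <;> rw [h0] <;> split_ifs <;> first | rfl | omega

-- the counting loop as Option-sequencing: bucketsOf = seqOpt of the lookups, then a plain foldl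
lemma foldl_bind_step (g : Int → Option Int) (bound : Int) :
    ∀ (is : List Int) (acc : Option (List Int)),
      is.foldl (fun a i => a.bind (fun bs =>
          match g i with | none => none | some n => some (bucketStep bound bs n))) acc
        = acc.bind (fun bs => (seqOpt (is.map g)).map (fun ns => ns.foldl (bucketStep bound) bs)) := by
  intro is
  induction is with
  | nil => intro acc; cases acc <;> simp [seqOpt]
  | cons i rest ih =>
    intro acc
    simp only [List.foldl_cons, List.map_cons]
    rw [ih]
    cases acc with
    | none => simp
    | some bs =>
      cases hg : g i with
      | none => simp [seqOpt]
      | some n =>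
        simp [seqOpt, Option.bind_some]
        cases seqOpt (rest.map g) <;> simp

lemma bucketsOf_eq (row : List (String × Int)) (count bound : Int) :
    bucketsOf row count bound =
      (seqOpt ((PySem.List.pyRange 1 (count + 1) 1).map
          (fun i => List.lookup ("boule_" ++ PySem.Int.toStr i) row))).map
        (fun ns => ns.foldl (bucketStep bound) (List.replicate 9 0)) := by
  unfold bucketsOf
  rw [foldl_bind_step]
  rfl

-- histogram characterisation of the counting loop
lemma counts_spec (bound : Int) (hb : bound ≤ 70) (ns : List Int) :
    ns.foldl (bucketStep bound) (List.replicate 9 0) =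
      (List.range 9).map (fun j => ((ns.countP (fun n => pyIdx bound n = j)) : Int)) := by
  induction ns using List.reverseRecOn with
  | nil =>
    simp only [List.foldl_nil, List.countP_nil]
    decide
  | append_singleton ns n ih =>
    rw [List.foldl_append, List.foldl_cons, List.foldl_nil, ih, bucketStep_eq]
    apply List.ext_getElem
    · simp
    intro j hj1 hj2
    have hjlt : j < 9 := by simpa using hj1
    have hidx : pyIdx bound n < 9 := pyIdx_lt bound n hb
    rw [List.getElem_set]
    by_cases he : pyIdx bound n = j
    · rw [if_pos he]
      have hg : (((List.range 9).map (fun j => ((ns.countP (fun m => pyIdx bound m = j)) : Int))).getD (pyIdx bound n) 0)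
          = ((ns.countP (fun m => pyIdx bound m = pyIdx bound n)) : Int) := by
        rw [List.getD_eq_getElem?_getD, List.getElem?_map, List.getElem?_range hidx]
        rfl
      rw [hg]
      simp only [List.getElem_map, List.getElem_range]
      rw [List.countP_append]
      simp [he]
    · rw [if_neg he]
      simp only [List.getElem_map, List.getElem_range]
      rw [List.countP_append]
      simp [he]

-- a ≤-sorted list is the concatenation of its key-buckets in key order
lemma sorted_filter_decomp (key : Int → Nat) (K : Nat)
    (hmono : ∀ a b : Int, a ≤ b → key a ≤ key b) :
    ∀ (ys : List Int), ys.Pairwise (· ≤ ·) → (∀ y ∈ ys, key y < K) →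
      ys = (List.range K).flatMap (fun j => ys.filter (fun y => key y = j)) := by
  intro ys
  induction ys with
  | nil => intro _ _; simp
  | cons x ys ih =>
    intro hp hlt
    rw [List.pairwise_cons] at hp
    obtain ⟨hx, hp'⟩ := hp
    have hxK : key x < K := hlt x (by simp)
    have hkey : ∀ y ∈ ys, key x ≤ key y := fun y hy => hmono _ _ (hx y hy)
    -- split range K at key x
    have hsplit : List.range K = List.range (key x) ++ (key x) ::
        (List.range (K - key x - 1)).map (fun t => key x + (t + 1)) := by
      have h1 : K = key x + (K - key x) := by omega
      have h2 : K - key x = (K - key x - 1) + 1 := by omega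
      calc List.range K = List.range (key x + (K - key x)) := by rw [← h1]
        _ = List.range (key x) ++ (List.range (K - key x)).map (fun t => key x + t) := by
              rw [List.range_add]
        _ = _ := by
              rw [h2, List.range_succ_eq_map]
              simp [Function.comp_def]
    have hlow : ∀ j < key x, ((x :: ys).filter (fun y => key y = j)) = [] := by
      intro j hj
      rw [List.filter_eq_nil_iff]
      intro y hy
      rcases List.mem_cons.mp hy with rfl | hy'
      · simp; omega
      · have := hkey y hy'; simp; omega
    have hlow' : ∀ j < key x, (ys.filter (fun y => key y = j)) = [] := by
      intro j hj
      rw [List.filter_eq_nil_iff]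
      intro y hy
      have := hkey y hy; simp; omega
    rw [hsplit, List.flatMap_append, List.flatMap_cons]
    have hz1 : (List.range (key x)).flatMap (fun j => (x :: ys).filter (fun y => key y = (j:Nat))) = [] := by
      apply List.flatMap_eq_nil_iff.mpr
      intro j hj
      exact hlow j (List.mem_range.mp hj)
    rw [hz1, List.nil_append]
    have hmid : (x :: ys).filter (fun y => key y = key x) = x :: ys.filter (fun y => key y = key x) := by
      rw [List.filter_cons_of_pos (by simp)]
    rw [hmid]
    have hhigh : (((List.range (K - key x - 1)).map (fun t => key x + (t + 1))).flatMap
          (fun j => (x :: ys).filter (fun y => key y = j)))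
        = (((List.range (K - key x - 1)).map (fun t => key x + (t + 1))).flatMap
          (fun j => ys.filter (fun y => key y = j))) := by
      apply List.flatMap_congr
      intro j hj
      obtain ⟨t, _, rfl⟩ := List.mem_map.mp hj
      rw [List.filter_cons_of_neg (by simp)]
    rw [hhigh, List.cons_append]
    congr 1
    have ihys := ih hp' (fun y hy => hlt y (List.mem_cons_of_mem _ hy))
    conv_lhs => rw [ihys]
    rw [hsplit, List.flatMap_append, List.flatMap_cons]
    have hz2 : (List.range (key x)).flatMap (fun j => ys.filter (fun y => key y = (j:Nat))) = [] := by
      apply List.flatMap_eq_nil_iff.mpr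
      intro j hj
      exact hlow' j (List.mem_range.mp hj)
    rw [hz2, List.nil_append]

-- A's sorted-then-map list equals the bucket expansion over the 9 histogram slots
lemma sorted_map_eq_flatMap (bound : Int) (hb : bound ≤ 70) (nums : List Int) :
    (PySem.List.sorted nums (fun x => x) false).map (fun n => pyLABELS.getD (pyIdx bound n) "")
      = (List.range 9).flatMap (fun j =>
          List.replicate (nums.countP (fun n => pyIdx bound n = j)) (pyLABELS.getD j "")) := by
  have hperm := PySem.List.sorted_perm nums (fun x => x) false
  have hp : (PySem.List.sorted nums (fun x => x) false).Pairwise (· ≤ ·) := by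
    have := PySem.List.sorted_pairwise nums (fun x => x)
    simpa using this
  have hdec := sorted_filter_decomp (pyIdx bound) 9 (fun a b h => pyIdx_mono bound hb h)
    (PySem.List.sorted nums (fun x => x) false) hp
    (fun y _ => pyIdx_lt bound y hb)
  conv_lhs => rw [hdec]
  rw [List.map_flatMap]
  apply List.flatMap_congr
  intro j hj
  have hmapc : ∀ l : List Int, (∀ n ∈ l, pyIdx bound n = j) →
      l.map (fun n => pyLABELS.getD (pyIdx bound n) "") = List.replicate l.length (pyLABELS.getD j "") := by
    intro l hl
    rw [List.eq_replicate_iff]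
    constructor
    · simp
    · intro b hbm
      obtain ⟨n, hn, rfl⟩ := List.mem_map.mp hbm
      rw [hl n hn]
  rw [hmapc _ (fun n hn => by
      have := (List.mem_filter.mp hn).2
      simpa using this)]
  rw [← List.countP_eq_length_filter]
  congr 1
  exact hperm.countP_eq _

-- B's zip expansion over the histogram equals the same flatMap
lemma zip_expand (c : Nat → Nat) :
    ((pyLABELS.zip ((List.range 9).map (fun j => ((c j : Nat) : Int)))).flatMap
        (fun p => List.replicate p.2.toNat p.1))
      = (List.range 9).flatMap (fun j => List.replicate (c j) (pyLABELS.getD j "")) := by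
  have hlab : pyLABELS = (List.range 9).map (fun j => pyLABELS.getD j "") := by decide
  conv_lhs => rw [hlab]
  rw [List.zip_map']
  rw [List.flatMap_map]
  simp

-- the common non-empty-data core: same lookups, A sorts and maps, B counts and expands
lemma core_eq (row : List (String × Int)) (count bound : Int) (hb : bound ≤ 70)
    (mx : Int) (hbnd : (if mx = 70 then (70:Int) else 49) = bound) :
    (match seqOpt ((PySem.List.pyRange 1 (count + 1) 1).map
        (fun i => List.lookup ("boule_" ++ PySem.Int.toStr i) row)) with
     | none => ""
     | some nums => PySem.Str.join "-"
        ((PySem.List.sorted nums (fun x => x) false).map (fun n => categorize_number n mx)))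
    = (match bucketsOf row count bound with
       | none => ""
       | some buckets => PySem.Str.join "-"
          ((pyLABELS.zip buckets).flatMap (fun p => List.replicate p.2.toNat p.1))) := by
  rw [bucketsOf_eq]
  cases hs : seqOpt ((PySem.List.pyRange 1 (count + 1) 1).map
      (fun i => List.lookup ("boule_" ++ PySem.Int.toStr i) row)) with
  | none => rfl
  | some nums =>
    simp only [Option.map_some]
    congr 1
    rw [counts_spec bound hb nums, zip_expand (fun j => nums.countP (fun n => pyIdx bound n = j))]
    have : (fun n => categorize_number n mx) = (fun n => pyLABELS.getD (pyIdx bound n) "") := by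
      funext n
      rw [categorize_eq_label, hbnd]
    rw [this]
    exact sorted_map_eq_flatMap bound hb nums

lemma keys5_eq (row : List (String × Int)) :
    (PySem.List.pyRange 1 6 1).map (fun i => List.lookup ("boule_" ++ PySem.Int.toStr i) row) =
      [List.lookup "boule_1" row, List.lookup "boule_2" row, List.lookup "boule_3" row,
       List.lookup "boule_4" row, List.lookup "boule_5" row] := by
  have hr : PySem.List.pyRange 1 6 1 = [1, 2, 3, 4, 5] := by decide
  rw [hr]
  simp only [List.map]
  norm_num [show ("boule_" ++ PySem.Int.toStr 1) = "boule_1" from by decide,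
    show ("boule_" ++ PySem.Int.toStr 2) = "boule_2" from by decide,
    show ("boule_" ++ PySem.Int.toStr 3) = "boule_3" from by decide,
    show ("boule_" ++ PySem.Int.toStr 4) = "boule_4" from by decide,
    show ("boule_" ++ PySem.Int.toStr 5) = "boule_5" from by decide]

-- ===== VERDICT =====
theorem predict_next_pattern_spec : Claim_equal_predict_next_pattern := by
  intro data mx _ _
  unfold Spec_predict_next_pattern predict_next_pattern predict_next_pattern_alt
  by_cases hd : data = []
  · simp only [hd, if_true]
    by_cases h : mx = 70 <;> simp only [h, if_true, if_false] <;> decide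
  · simp only [hd, if_false]
    cases hrow : PySem.List.pyGet? data (-1) with
    | none => rfl
    | some row =>
      by_cases h : mx = 70
      · subst h
        simp only [if_true]
        have := core_eq row 20 70 (by omega) 70 (by norm_num)
        simp only [show (20:Int) + 1 = 21 from by norm_num] at this
        simpa using this
      · simp only [h, if_false]
        have := core_eq row 5 49 (by omega) mx (by rw [if_neg h])
        simp only [show (5:Int) + 1 = 6 from by norm_num] at this
        rw [keys5_eq row] at this
        simpa using this
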